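-- pv_equiv track=rewrite | github.com/peterprospl12/breathing-classification-v2 | breathing_model/analysis/evaluate_breath_events_two_transformers.py | sequence_to_events
-- ===== SOURCE A (Python) =====
-- def sequence_to_events(sequence: list[int]) -> list[dict]:
--     events = []
--     if not sequence:
--         return events
--     start = 0
--     cls = sequence[0]
--     for idx in range(1, len(sequence)):
--         if sequence[idx] != cls:
--             events.append({"class": cls, "start": start, "end": idx})
--             start = idx
--             cls = sequence[idx]
--     events.append({"class": cls, "start": start, "end": len(sequence)})
--     return events
-- ===== SOURCE B (Python) =====
-- def sequence_to_events(sequence: list[int]) -> list[dict]: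
--     if not sequence:
--         return []
--     n = len(sequence)
--     bounds = [0] + [i for i in range(1, n) if sequence[i] != sequence[i - 1]] + [n]
--     return [{"class": sequence[s], "start": s, "end": e}
--             for s, e in zip(bounds, bounds[1:])]
-- ===== Notes on version B (the rewrite author's own statement) =====
-- stated objective: alternative
-- what changed: Instead of a single accumulate-as-you-go pass carrying (start, current class) state, B first computes the list of boundary indices where the class changes and then maps each consecutive boundary pair to an event.
import Mathlib
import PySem

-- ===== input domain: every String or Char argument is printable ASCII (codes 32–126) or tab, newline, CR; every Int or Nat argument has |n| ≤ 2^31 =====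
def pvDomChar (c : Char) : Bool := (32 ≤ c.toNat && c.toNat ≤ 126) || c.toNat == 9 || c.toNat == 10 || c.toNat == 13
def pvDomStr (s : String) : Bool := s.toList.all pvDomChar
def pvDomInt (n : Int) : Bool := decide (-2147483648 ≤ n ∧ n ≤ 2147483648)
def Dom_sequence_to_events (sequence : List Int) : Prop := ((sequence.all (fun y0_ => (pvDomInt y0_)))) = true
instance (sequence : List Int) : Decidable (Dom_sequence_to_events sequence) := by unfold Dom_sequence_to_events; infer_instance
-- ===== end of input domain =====

-- B replaces A's single accumulate-as-you-go pass (carrying start/class state) by first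
-- collecting the boundary indices where the class changes and then mapping consecutive
-- boundary pairs to events; same O(n) cost (objective: alternative decomposition).

-- ===== PORT A =====
-- loop body of A's for-loop (events, start, cls as the fold state)
def pvStepA (sequence : List Int) (acc : List (List (String × Int)) × Int × Int) (idx : Int) :
    List (List (String × Int)) × Int × Int :=
  if PySem.List.pyGetD sequence idx 0 ≠ acc.2.2 then
    (acc.1 ++ [[("class", acc.2.2), ("start", acc.2.1), ("end", idx)]], idx,
      PySem.List.pyGetD sequence idx 0)
  else acc

def sequence_to_events (sequence : List Int) : List (List (String × Int)) :=
  if sequence = [] then []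
  else
    let r := (PySem.List.pyRange 1 (sequence.length : Int) 1).foldl (pvStepA sequence)
      ([], 0, PySem.List.pyGetD sequence 0 0)
    r.1 ++ [[("class", r.2.2), ("start", r.2.1), ("end", (sequence.length : Int))]]

-- ===== PORT B =====
-- boundary test: sequence[i] != sequence[i-1]
def pvIsBoundary (sequence : List Int) (i : Int) : Bool :=
  PySem.List.pyGetD sequence i 0 ≠ PySem.List.pyGetD sequence (i - 1) 0

-- event for a boundary pair (s, e)
def pvMkEvent (sequence : List Int) (p : Int × Int) : List (String × Int) :=
  [("class", PySem.List.pyGetD sequence p.1 0), ("start", p.1), ("end", p.2)]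

def sequence_to_events_alt (sequence : List Int) : List (List (String × Int)) :=
  if sequence = [] then []
  else
    let n : Int := (sequence.length : Int)
    let bounds := [(0 : Int)] ++
      (PySem.List.pyRange 1 n 1).filter (pvIsBoundary sequence) ++ [n]
    (bounds.zip bounds.tail).map (pvMkEvent sequence)

-- ===== PRECONDITION & SPEC =====
def Spec_sequence_to_events (sequence : List Int) (out : List (List (String × Int))) : Prop := out = sequence_to_events_alt sequence
instance (sequence : List Int) (out : List (List (String × Int))) : Decidable (Spec_sequence_to_events sequence out) := by unfold Spec_sequence_to_events; infer_instance

-- ===== CLAIM (what is proved, stated in full; the proofs are below) =====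
def Claim_equal_sequence_to_events : Prop := ∀ (sequence : List Int), Dom_sequence_to_events sequence → Spec_sequence_to_events sequence (sequence_to_events sequence)

-- ===== LEMMAS AND PROOFS =====

-- the events B produces from a boundary list (zip with its own tail, then map)
def pvPairEvents (sequence : List Int) (b : List Int) : List (List (String × Int)) :=
  (b.zip b.tail).map (pvMkEvent sequence)

lemma pvPairEvents_cons_cons (sequence : List Int) (s t : Int) (rest : List Int) :
    pvPairEvents sequence (s :: t :: rest)
      = pvMkEvent sequence (s, t) :: pvPairEvents sequence (t :: rest) := by
  simp [pvPairEvents]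

-- main loop invariant: running A's fold from index k (with cls = sequence[k-1] = sequence[s])
-- and appending the final event yields B's events over boundaries s :: (changes in [k,n)) ++ [n]
lemma pvLoop_eq (sequence : List Int) (m : Nat) :
    ∀ (k : Int) (events : List (List (String × Int))) (s cls : Int),
    ((sequence.length : Int) - k).toNat = m →
    1 ≤ k → k ≤ (sequence.length : Int) →
    cls = PySem.List.pyGetD sequence (k - 1) 0 →
    cls = PySem.List.pyGetD sequence s 0 →
    (let r := (PySem.List.pyRange k (sequence.length : Int) 1).foldl (pvStepA sequence)
        (events, s, cls)
     r.1 ++ [[("class", r.2.2), ("start", r.2.1), ("end", (sequence.length : Int))]])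
      = events ++ pvPairEvents sequence
          (s :: ((PySem.List.pyRange k (sequence.length : Int) 1).filter
            (pvIsBoundary sequence) ++ [(sequence.length : Int)])) := by
  induction m with
  | zero =>
    intro k events s cls hm h1 h2 hc1 hc2
    have hk : (sequence.length : Int) ≤ k := by omega
    rw [PySem.List.pyRange_one_eq_nil hk]
    simp [pvPairEvents, pvMkEvent, hc2]
  | succ m ih =>
    intro k events s cls hm h1 h2 hc1 hc2
    have hk : k < (sequence.length : Int) := by omega
    rw [PySem.List.pyRange_one_cons hk]
    by_cases h : PySem.List.pyGetD sequence k 0 = cls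
    · -- no boundary at k
      have hb : pvIsBoundary sequence k = false := by
        simp [pvIsBoundary, h, ← hc1]
      have hstep : pvStepA sequence (events, s, cls) k = (events, s, cls) := by
        simp [pvStepA, h]
      simp only [List.foldl_cons, List.filter_cons, hb, hstep, Bool.false_eq_true, if_false]
      exact ih (k + 1) events s cls (by omega) (by omega) (by omega)
        (by simpa using h.symm) hc2
    · -- boundary at k: A emits an event, B records a boundary
      have hb : pvIsBoundary sequence k = true := by
        simp [pvIsBoundary, ← hc1]; exact h
      have hstep : pvStepA sequence (events, s, cls) k
          = (events ++ [[("class", cls), ("start", s), ("end", k)]], k,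
             PySem.List.pyGetD sequence k 0) := by
        simp [pvStepA, h]
      simp only [List.foldl_cons, List.filter_cons, hb, hstep, if_true]
      rw [ih (k + 1) (events ++ [[("class", cls), ("start", s), ("end", k)]]) k
        (PySem.List.pyGetD sequence k 0) (by omega) (by omega) (by omega)
        (by simp) rfl]
      simp only [List.cons_append, pvPairEvents_cons_cons]
      simp [pvMkEvent, hc2]

-- ===== VERDICT (by name: the statement is the Claim_ definition above) =====
theorem sequence_to_events_spec : Claim_equal_sequence_to_events := by
  intro sequence _
  unfold Spec_sequence_to_events sequence_to_events sequence_to_events_alt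
  by_cases hnil : sequence = []
  · simp [hnil]
  · simp only [hnil, if_false]
    have hlen : 1 ≤ (sequence.length : Int) := by
      have := List.length_pos_iff.mpr hnil; omega
    have := pvLoop_eq sequence ((sequence.length : Int) - 1).toNat 1 [] 0
      (PySem.List.pyGetD sequence 0 0) rfl (by omega) hlen (by norm_num) rfl
    simpa [pvPairEvents] using this
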